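-- pv_equiv track=rewrite | github.com/tejashri03/SheCares-New | backend/mysql_backend.py | find_target_column
-- ===== SOURCE A (Python) =====
-- def find_column(columns, candidate_names):
--     for candidate in candidate_names:
--         if candidate in columns:
--             return candidate
--     return None
--
-- def find_target_column(columns):
--     exact = find_column(columns, ['pcos_y_n', 'pcos'])
--     if exact:
--         return exact
--     for col in columns:
--         if 'pcos' in col and ('y_n' in col or col.endswith('yn')):
--             return col
--     for col in columns:
--         if 'pcos' in col:
--             return col
--     return None
-- ===== SOURCE B (Python) =====
-- def find_target_column(columns):
--     has_exact_yn = False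
--     has_exact_p = False
--     fuzzy = None
--     anyp = None
--     for col in columns:
--         if 'pcos' not in col:
--             continue
--         if col == 'pcos_y_n':
--             has_exact_yn = True
--         elif col == 'pcos':
--             has_exact_p = True
--         if anyp is None:
--             anyp = col
--         if fuzzy is None and ('y_n' in col or col.endswith('yn')):
--             fuzzy = col
--     if has_exact_yn:
--         return 'pcos_y_n'
--     if has_exact_p:
--         return 'pcos'
--     return fuzzy if fuzzy is not None else anyp
-- ===== Notes on version B (the rewrite author's own statement) =====
-- stated objective: alternative
-- what changed: Replaced A's three separate passes (exact-name membership probes, then a fuzzy scan, then an any-'pcos' scan) by a single left-to-right pass that accumulates four pieces of state (exact flags and the first fuzzy / first 'pcos' column) and picks the answer afterwards.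
import Mathlib
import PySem

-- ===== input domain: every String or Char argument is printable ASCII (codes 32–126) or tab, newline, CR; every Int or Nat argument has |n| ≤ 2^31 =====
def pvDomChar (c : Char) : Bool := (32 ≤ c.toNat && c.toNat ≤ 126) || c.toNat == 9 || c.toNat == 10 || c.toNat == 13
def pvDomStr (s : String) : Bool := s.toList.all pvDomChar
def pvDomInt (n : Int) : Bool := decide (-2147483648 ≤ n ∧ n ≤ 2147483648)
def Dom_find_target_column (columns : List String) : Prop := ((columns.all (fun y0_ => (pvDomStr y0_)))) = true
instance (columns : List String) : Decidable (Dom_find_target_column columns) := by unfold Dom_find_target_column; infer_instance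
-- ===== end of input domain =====

-- B makes one pass with four accumulators instead of A's three passes; objective: alternative (single traversal).

-- ===== PORT A =====
def find_column (columns : List String) : List String → Option String
  | [] => none
  | candidate :: rest =>
      if columns.contains candidate then some candidate else find_column columns rest

def find_target_column (columns : List String) : Option String :=
  match find_column columns ["pcos_y_n", "pcos"] with
  | some exact => some exact
  | none =>
    match columns.find? (fun col =>
        PySem.Str.isIn "pcos" col && (PySem.Str.isIn "y_n" col || PySem.Str.endswith col "yn")) with
    | some col => some col
    | none => columns.find? (fun col => PySem.Str.isIn "pcos" col)

-- ===== PORT B =====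
structure PState where
  hasYn : Bool
  hasP : Bool
  fuzzy : Option String
  anyp : Option String
deriving DecidableEq, Repr

def bStep (st : PState) (col : String) : PState :=
  if PySem.Str.isIn "pcos" col then
    let st1 := if col == "pcos_y_n" then { st with hasYn := true }
               else if col == "pcos" then { st with hasP := true }
               else st
    let st2 := if st1.anyp.isNone then { st1 with anyp := some col } else st1
    if st2.fuzzy.isNone && (PySem.Str.isIn "y_n" col || PySem.Str.endswith col "yn") then
      { st2 with fuzzy := some col }
    else st2
  else st

def find_target_column_alt (columns : List String) : Option String :=
  let st := columns.foldl bStep ⟨false, false, none, none⟩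
  if st.hasYn then some "pcos_y_n"
  else if st.hasP then some "pcos"
  else match st.fuzzy with
       | some c => some c
       | none => st.anyp

-- ===== PRECONDITION & SPEC =====
def Spec_find_target_column (columns : List String) (out : Option String) : Prop := out = find_target_column_alt columns
instance (columns : List String) (out : Option String) : Decidable (Spec_find_target_column columns out) := by unfold Spec_find_target_column; infer_instance

-- ===== CLAIM (what is proved, stated in full; the proofs are below) =====
def Claim_equal_find_target_column : Prop := ∀ (columns : List String), Dom_find_target_column columns → Spec_find_target_column columns (find_target_column columns)

-- ===== LEMMAS AND PROOFS =====

def fuzzyPred (col : String) : Bool :=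
  PySem.Str.isIn "pcos" col && (PySem.Str.isIn "y_n" col || PySem.Str.endswith col "yn")

def pPred (col : String) : Bool := PySem.Str.isIn "pcos" col

theorem foldl_bStep_char (l : List String) (st : PState) :
    l.foldl bStep st =
      ⟨st.hasYn || l.contains "pcos_y_n",
       st.hasP || l.contains "pcos",
       (st.fuzzy).or (l.find? fuzzyPred),
       (st.anyp).or (l.find? pPred)⟩ := by
  induction l generalizing st with
  | nil => simp
  | cons c l ih =>
    rw [List.foldl_cons, ih]
    by_cases hp : PySem.Str.isIn "pcos" c = true
    · by_cases hyn : c = "pcos_y_n"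
      · subst hyn
        have e2 : PySem.Str.isIn "y_n" "pcos_y_n" = true := by decide
        have e3 : ("pcos_y_n" == "pcos") = false := by decide
        simp only [bStep, fuzzyPred, pPred, hp, e2, e3, List.find?, List.contains_cons,
          if_true, Bool.true_and, Bool.true_or, beq_self_eq_true, Bool.or_true]
        cases hfz : st.fuzzy <;> cases hap : st.anyp <;>
          simp_all [Option.or, List.contains_cons, e3]
      · by_cases hpe : c = "pcos"
        · subst hpe
          have e2 : PySem.Str.isIn "y_n" "pcos" = false := by decide
          have e2b : PySem.Str.endswith "pcos" "yn" = false := by decide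
          have e3 : ("pcos" == "pcos_y_n") = false := by decide
          simp only [bStep, fuzzyPred, pPred, hp, e2, e2b, e3, List.find?, List.contains_cons,
            if_true, if_false, Bool.true_and, Bool.false_or, Bool.or_false, beq_self_eq_true,
            Bool.or_true]
          cases hfz : st.fuzzy <;> cases hap : st.anyp <;>
            simp_all [Option.or, List.contains_cons, e3]
        · have e3 : (c == "pcos_y_n") = false := by simp [hyn]
          have e4 : (c == "pcos") = false := by simp [hpe]
          have e3' : ("pcos_y_n" == c) = false := by
            simp only [beq_eq_false_iff_ne]; exact fun h => hyn h.symm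
          have e4' : ("pcos" == c) = false := by
            simp only [beq_eq_false_iff_ne]; exact fun h => hpe h.symm
          cases hf1 : PySem.Str.isIn "y_n" c <;> cases hf2 : PySem.Str.endswith c "yn" <;>
            simp only [bStep, fuzzyPred, pPred, hp, e3, e4, hf1, hf2, List.find?,
              List.contains_cons] <;>
            (cases hfz : st.fuzzy <;> cases hap : st.anyp <;>
              simp_all [Option.or, List.contains_cons, beq_eq_decide, e3', e4'])
    · have hpb : PySem.Str.isIn "pcos" c = false := eq_false_of_ne_true hp
      have hpc : PySem.Chars.isIn ['p', 'c', 'o', 's'] c.toList = false := by simpa using hpb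
      have hf : fuzzyPred c = false := by unfold fuzzyPred; rw [hpb, Bool.false_and]
      have hpp : pPred c = false := hpb
      have hyn : ¬ ("pcos_y_n" = c) := by rintro rfl; exact hp (by decide)
      have hpe : ¬ ("pcos" = c) := by rintro rfl; exact hp (by decide)
      simp [bStep, hpc, List.find?, hf, hpp, List.contains_cons, beq_eq_decide, hyn, hpe]

-- ===== VERDICT (by name: the statement is the Claim_ definition above) =====
theorem find_target_column_spec : Claim_equal_find_target_column := by
  intro columns _
  unfold Spec_find_target_column find_target_column find_target_column_alt
  rw [foldl_bStep_char]
  rw [show (fun col => PySem.Str.isIn "pcos" col &&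
        (PySem.Str.isIn "y_n" col || PySem.Str.endswith col "yn")) = fuzzyPred from rfl,
      show (fun col => PySem.Str.isIn "pcos" col) = pPred from rfl]
  simp only [find_column, Bool.false_or, Option.none_or]
  by_cases h1 : "pcos_y_n" ∈ columns
  · simp [h1]
  · by_cases h2 : "pcos" ∈ columns
    · simp [h1, h2]
    · cases hf : columns.find? fuzzyPred <;> simp [h1, h2, hf]
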